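-- pv_equiv track=rewrite | github.com/alekh08/Hackerrank | Ema's-Supercomputer.py | get_pluses
-- ===== SOURCE A (Python) =====
-- def get_pluses(grid):
--     n, m = len(grid), len(grid[0])
--     pluses = []
--
--     for i in range(n):
--         for j in range(m):
--             if grid[i][j] != 'G':
--                 continue
--             size = 0
--             while True:
--                 if (i - size < 0 or i + size >= n or
--                     j - size < 0 or j + size >= m or
--                     grid[i - size][j] != 'G' or
--                     grid[i + size][j] != 'G' or
--                     grid[i][j - size] != 'G' or
--                     grid[i][j + size] != 'G'):
--                     break
--                 cells = {(i, j)}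
--                 for k in range(1, size + 1):
--                     cells.update([(i - k, j), (i + k, j), (i, j - k), (i, j + k)])
--                 pluses.append(cells)
--                 size += 1
--     return pluses
-- ===== SOURCE B (Python) =====
-- def get_pluses(grid):
--     n, m = len(grid), len(grid[0])
--     pluses = []
--
--     for i in range(n):
--         for j in range(m):
--             if grid[i][j] != 'G':
--                 continue
--             # four small linear scans: contiguous 'G' runs in each direction
--             up = down = left = right = 0
--             while i - up - 1 >= 0 and grid[i - up - 1][j] == 'G':
--                 up += 1
--             while i + down + 1 < n and grid[i + down + 1][j] == 'G':
--                 down += 1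
--             while j - left - 1 >= 0 and grid[i][j - left - 1] == 'G':
--                 left += 1
--             while j + right + 1 < m and grid[i][j + right + 1] == 'G':
--                 right += 1
--             maxsize = min(up, down, left, right)
--             # grow one set incrementally, snapshotting each size
--             cells = {(i, j)}
--             pluses.append(set(cells))
--             for k in range(1, maxsize + 1):
--                 cells.update([(i - k, j), (i + k, j), (i, j - k), (i, j + k)])
--                 pluses.append(set(cells))
--     return pluses
-- ===== Notes on version B (the rewrite author's own statement) =====
-- stated objective: alternative
-- what changed: A's grow-and-probe while-loop (re-testing the plus condition and rebuilding the cell set from scratch at every size) is replaced by four linear arm scans that compute the maximal size directly, followed by one incremental set grown once per size with a snapshot appended each step.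
import Mathlib
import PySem

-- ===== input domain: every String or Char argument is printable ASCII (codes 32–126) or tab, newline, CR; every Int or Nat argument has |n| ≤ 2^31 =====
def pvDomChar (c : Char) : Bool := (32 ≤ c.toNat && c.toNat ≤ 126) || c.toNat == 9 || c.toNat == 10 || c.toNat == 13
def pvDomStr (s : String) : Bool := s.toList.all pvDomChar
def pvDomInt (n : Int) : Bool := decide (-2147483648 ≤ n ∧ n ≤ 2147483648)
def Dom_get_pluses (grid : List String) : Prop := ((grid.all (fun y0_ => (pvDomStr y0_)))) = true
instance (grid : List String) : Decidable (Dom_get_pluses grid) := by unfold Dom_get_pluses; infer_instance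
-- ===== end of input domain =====

-- B replaces A's grow-and-probe while-loop with four arm scans plus one incrementally grown set (alternative decomposition, same results).

-- ===== PORT A =====
-- grid[i][j] for Nat indices; exact wherever the Python read is guarded in range (all reads of both programs are, inside Pre_).
def pvGet (grid : List String) (i j : Nat) : Char :=
  ((grid.getD i "").toList.getD j ' ')

-- the continue-condition of A's `while True: if … break`
def pvOk (grid : List String) (n m i j s : Nat) : Bool :=
  decide (s ≤ i) && decide (i + s < n) && decide (s ≤ j) && decide (j + s < m) &&
  (pvGet grid (i - s) j == 'G') && (pvGet grid (i + s) j == 'G') &&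
  (pvGet grid i (j - s) == 'G') && (pvGet grid i (j + s) == 'G')

-- cells = {(i,j)}; for k in range(1, size+1): cells.update([...])
def pvCells (i j : Nat) (s : Nat) : List (Int × Int) :=
  (List.range' 1 s).foldl
    (fun c (k : Nat) => PySem.Set.update c
      [((i : Int) - (k : Int), (j : Int)), ((i : Int) + (k : Int), (j : Int)),
       ((i : Int), (j : Int) - (k : Int)), ((i : Int), (j : Int) + (k : Int))])
    (PySem.Set.ofList [((i : Int), (j : Int))])

-- A's while-loop; the fuel only makes the loop total (it is never exhausted: pvOk forces s ≤ i < n)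
def pvWhile (grid : List String) (n m i j : Nat) : Nat → Nat → List (List (Int × Int))
  | 0, _ => []
  | f + 1, s =>
    if pvOk grid n m i j s then pvCells i j s :: pvWhile grid n m i j f (s + 1) else []

def get_pluses (grid : List String) : List (List (Int × Int)) :=
  let n := grid.length
  let m := (grid.headD "").toList.length
  (List.range n).foldl (fun acc i =>
    (List.range m).foldl (fun acc j =>
      if pvGet grid i j ≠ 'G' then acc
      else acc ++ pvWhile grid n m i j (n + 2) 0) acc) []

-- ===== PORT B =====
-- one of B's counting while-loops: counts consecutive k = k0, k0+1, … with cond k (fuel only for totality, chosen never to run out)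
def pvRun (cond : Nat → Bool) : Nat → Nat → Nat
  | 0, _ => 0
  | f + 1, k => if cond k then pvRun cond f (k + 1) + 1 else 0

-- B's incremental growth: cells.update(four arms at k); pluses.append(set(cells)); k += 1 — c snapshots remain
def pvGrow (i j : Nat) : Nat → Nat → List (Int × Int) → List (List (Int × Int))
  | _, 0, _ => []
  | k, c + 1, cells =>
    let cells' := PySem.Set.update cells
      [((i : Int) - (k : Int), (j : Int)), ((i : Int) + (k : Int), (j : Int)),
       ((i : Int), (j : Int) - (k : Int)), ((i : Int), (j : Int) + (k : Int))]
    cells' :: pvGrow i j (k + 1) c cells'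

def get_pluses_alt (grid : List String) : List (List (Int × Int)) :=
  let n := grid.length
  let m := (grid.headD "").toList.length
  (List.range n).foldl (fun acc i =>
    (List.range m).foldl (fun acc j =>
      if pvGet grid i j ≠ 'G' then acc
      else
        let up := pvRun (fun k => decide (k ≤ i) && (pvGet grid (i - k) j == 'G')) (i + 1) 1
        let down := pvRun (fun k => decide (i + k < n) && (pvGet grid (i + k) j == 'G')) n 1
        let left := pvRun (fun k => decide (k ≤ j) && (pvGet grid i (j - k) == 'G')) (j + 1) 1
        let right := pvRun (fun k => decide (j + k < m) && (pvGet grid i (j + k) == 'G')) m 1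
        let maxsize := min (min up down) (min left right)
        let cells0 := PySem.Set.ofList [((i : Int), (j : Int))]
        acc ++ (cells0 :: pvGrow i j 1 maxsize cells0)) acc) []

-- ===== PRECONDITION & SPEC =====
-- Pre_ excludes exactly the inputs where Python A raises: the empty grid (len(grid[0]) → IndexError) and
-- grids with a row shorter than the first row (grid[i][j] is read for every j < len(grid[0]) → IndexError).
def Pre_get_pluses (grid : List String) : Prop :=
  grid ≠ [] ∧ ∀ s ∈ grid, (grid.headD "").toList.length ≤ s.toList.length
instance (grid : List String) : Decidable (Pre_get_pluses grid) := by unfold Pre_get_pluses; infer_instance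

def pvWitness_get_pluses : List String := ["BGB", "GGG", "BGB"]

def Spec_get_pluses (grid : List String) (out : List (List (Int × Int))) : Prop := out = get_pluses_alt grid
instance (grid : List String) (out : List (List (Int × Int))) : Decidable (Spec_get_pluses grid out) := by unfold Spec_get_pluses; infer_instance

-- ===== CLAIM (what is proved, stated in full; the proofs are below) =====
def Claim_equal_get_pluses : Prop := ∀ (grid : List String), Dom_get_pluses grid → Pre_get_pluses grid → Spec_get_pluses grid (get_pluses grid)

-- ===== LEMMAS AND PROOFS =====

theorem pvRun_le (cond : Nat → Bool) : ∀ f k, pvRun cond f k ≤ f := by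
  intro f
  induction f with
  | zero => intro k; simp [pvRun]
  | succ f ih =>
    intro k
    simp only [pvRun]
    split
    · exact Nat.succ_le_succ (ih (k + 1))
    · exact Nat.zero_le _

theorem pvRun_true (cond : Nat → Bool) :
    ∀ f k t, k ≤ t → t < k + pvRun cond f k → cond t = true := by
  intro f
  induction f with
  | zero => intro k t h1 h2; simp [pvRun] at h2; omega
  | succ f ih =>
    intro k t h1 h2
    simp only [pvRun] at h2
    by_cases hc : cond k = true
    · simp [hc] at h2
      rcases Nat.eq_or_lt_of_le h1 with rfl | hlt
      · exact hc
      · exact ih (k + 1) t hlt (by omega)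
    · simp [hc] at h2; omega

theorem pvRun_false (cond : Nat → Bool) :
    ∀ f k, pvRun cond f k < f → cond (k + pvRun cond f k) = false := by
  intro f
  induction f with
  | zero => intro k h; omega
  | succ f ih =>
    intro k h
    by_cases hc : cond k = true
    · have hr : pvRun cond (f + 1) k = pvRun cond f (k + 1) + 1 := by simp [pvRun, hc]
      rw [hr] at h ⊢
      have hrec := ih (k + 1) (by omega)
      rw [show k + (pvRun cond f (k + 1) + 1) = (k + 1) + pvRun cond f (k + 1) from by omega]
      exact hrec
    · have hr : pvRun cond (f + 1) k = 0 := by simp [pvRun, hc]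
      rw [hr]
      simpa using (Bool.eq_false_iff.mpr hc)

-- the four direction conditions, abbreviated for the lemmas
theorem pvOk_iff (grid : List String) (n m i j s : Nat) :
    pvOk grid n m i j s = true ↔
      (s ≤ i ∧ pvGet grid (i - s) j = 'G') ∧ (i + s < n ∧ pvGet grid (i + s) j = 'G') ∧
      (s ≤ j ∧ pvGet grid i (j - s) = 'G') ∧ (j + s < m ∧ pvGet grid i (j + s) = 'G') := by
  simp [pvOk]
  tauto

-- pvCells unrolls at the top: pvCells (s+1) = one more update of pvCells s
theorem pvCells_succ (i j s : Nat) :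
    pvCells i j (s + 1) = PySem.Set.update (pvCells i j s)
      [((i : Int) - ((s + 1 : Nat) : Int), (j : Int)), ((i : Int) + ((s + 1 : Nat) : Int), (j : Int)),
       ((i : Int), (j : Int) - ((s + 1 : Nat) : Int)), ((i : Int), (j : Int) + ((s + 1 : Nat) : Int))] := by
  rw [pvCells, List.range'_1_concat, List.foldl_append]
  rw [show 1 + s = s + 1 from Nat.add_comm 1 s]
  rfl

theorem pvGrow_eq_map (i j : Nat) :
    ∀ c k, pvGrow i j (k + 1) c (pvCells i j k) =
      (List.range' (k + 1) c).map (pvCells i j) := by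
  intro c
  induction c with
  | zero => intro k; simp [pvGrow]
  | succ c ih =>
    intro k
    rw [List.range'_succ]
    simp only [pvGrow, List.map_cons]
    rw [← pvCells_succ i j k]
    exact congrArg _ (ih (k + 1))

theorem pvWhile_eq_map (grid : List String) (n m i j M : Nat)
    (hok : ∀ t, t ≤ M → pvOk grid n m i j t = true)
    (hfail : pvOk grid n m i j (M + 1) = false) :
    ∀ f s, s ≤ M + 1 → M + 2 ≤ s + f →
      pvWhile grid n m i j f s = (List.range' s (M + 1 - s)).map (pvCells i j) := by
  intro f
  induction f with
  | zero => intro s h1 h2; exact absurd h2 (by omega)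
  | succ f ih =>
    intro s h1 h2
    by_cases hs : s = M + 1
    · subst hs
      simp [pvWhile, hfail]
    · have hsM : s ≤ M := by omega
      have h : M + 1 - s = (M - s) + 1 := by omega
      rw [h, List.range'_succ]
      simp only [pvWhile, hok s hsM, if_true, List.map_cons]
      have hrec := ih (s + 1) (by omega) (by omega)
      have hnum : M + 1 - (s + 1) = M - s := by omega
      rw [hrec, hnum]

-- the per-center equality: at a 'G' cell, A's probed while-loop output equals B's scan-and-grow output
theorem perCenter (grid : List String) (n m i j : Nat)
    (hin : i < n) (hjm : j < m) (hG : pvGet grid i j = 'G') :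
    pvWhile grid n m i j (n + 2) 0 =
      (PySem.Set.ofList [((i : Int), (j : Int))]) ::
        pvGrow i j 1
          (min (min (pvRun (fun k => decide (k ≤ i) && (pvGet grid (i - k) j == 'G')) (i + 1) 1)
                    (pvRun (fun k => decide (i + k < n) && (pvGet grid (i + k) j == 'G')) n 1))
               (min (pvRun (fun k => decide (k ≤ j) && (pvGet grid i (j - k) == 'G')) (j + 1) 1)
                    (pvRun (fun k => decide (j + k < m) && (pvGet grid i (j + k) == 'G')) m 1)))
          (PySem.Set.ofList [((i : Int), (j : Int))]) := by
  set cU := (fun k => decide (k ≤ i) && (pvGet grid (i - k) j == 'G')) with hcU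
  set cD := (fun k => decide (i + k < n) && (pvGet grid (i + k) j == 'G')) with hcD
  set cL := (fun k => decide (k ≤ j) && (pvGet grid i (j - k) == 'G')) with hcL
  set cR := (fun k => decide (j + k < m) && (pvGet grid i (j + k) == 'G')) with hcR
  set up := pvRun cU (i + 1) 1 with hup
  set down := pvRun cD n 1 with hdown
  set left := pvRun cL (j + 1) 1 with hleft
  set right := pvRun cR m 1 with hright
  set M := min (min up down) (min left right) with hM
  -- each run stops strictly before its fuel, so the condition right after it is false
  have hupi : up ≤ i := by
    by_contra h
    have h1 : up ≤ i + 1 := pvRun_le cU (i + 1) 1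
    have h2 : cU (i + 1) = true := pvRun_true cU (i + 1) 1 (i + 1) (by omega) (by omega)
    simp [hcU] at h2
  have hdn : down ≤ n - 1 - i := by
    by_contra h
    have h1 : down ≤ n := pvRun_le cD n 1
    have h2 : cD (n - i) = true := by
      apply pvRun_true cD n 1 (n - i) <;> omega
    simp [hcD] at h2
    omega
  have hlj : left ≤ j := by
    by_contra h
    have h1 : left ≤ j + 1 := pvRun_le cL (j + 1) 1
    have h2 : cL (j + 1) = true := pvRun_true cL (j + 1) 1 (j + 1) (by omega) (by omega)
    simp [hcL] at h2
  have hrm : right ≤ m - 1 - j := by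
    by_contra h
    have h1 : right ≤ m := pvRun_le cR m 1
    have h2 : cR (m - j) = true := by
      apply pvRun_true cR m 1 (m - j) <;> omega
    simp [hcR] at h2
    omega
  have hUf : cU (1 + up) = false := pvRun_false cU (i + 1) 1 (by omega)
  have hDf : cD (1 + down) = false := pvRun_false cD n 1 (by omega)
  have hLf : cL (1 + left) = false := pvRun_false cL (j + 1) 1 (by omega)
  have hRf : cR (1 + right) = false := pvRun_false cR m 1 (by omega)
  -- pvOk holds up to M
  have hok : ∀ t, t ≤ M → pvOk grid n m i j t = true := by
    intro t ht
    rcases Nat.eq_zero_or_pos t with rfl | htp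
    · rw [pvOk_iff]
      refine ⟨⟨by omega, by simpa⟩, ⟨by omega, by simpa⟩, ⟨by omega, by simpa⟩, ⟨by omega, by simpa⟩⟩
    · have hU : cU t = true := pvRun_true cU (i + 1) 1 t (by omega) (by omega)
      have hD : cD t = true := pvRun_true cD n 1 t (by omega) (by omega)
      have hL : cL t = true := pvRun_true cL (j + 1) 1 t (by omega) (by omega)
      have hR : cR t = true := pvRun_true cR m 1 t (by omega) (by omega)
      simp [hcU] at hU; simp [hcD] at hD; simp [hcL] at hL; simp [hcR] at hR
      rw [pvOk_iff]
      exact ⟨⟨hU.1, hU.2⟩, ⟨hD.1, hD.2⟩, ⟨hL.1, hL.2⟩, ⟨hR.1, hR.2⟩⟩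
  -- pvOk fails at M+1: the minimizing direction's condition is false there
  have hfail : pvOk grid n m i j (M + 1) = false := by
    rw [Bool.eq_false_iff]
    intro h'
    rw [pvOk_iff] at h'
    obtain ⟨⟨h1a, h1b⟩, ⟨h2a, h2b⟩, ⟨h3a, h3b⟩, ⟨h4a, h4b⟩⟩ := h'
    have hcase : M = up ∨ M = down ∨ M = left ∨ M = right := by omega
    rcases hcase with hE | hE | hE | hE
    · rw [hE] at h1a h1b
      have ht : cU (1 + up) = true := by
        simp [hcU, Nat.add_comm 1 up, h1a, h1b]
      rw [hUf] at ht; exact Bool.false_ne_true ht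
    · rw [hE] at h2a h2b
      have ht : cD (1 + down) = true := by
        simp [hcD, Nat.add_comm 1 down, h2b]
        omega
      rw [hDf] at ht; exact Bool.false_ne_true ht
    · rw [hE] at h3a h3b
      have ht : cL (1 + left) = true := by
        simp [hcL, Nat.add_comm 1 left, h3a, h3b]
      rw [hLf] at ht; exact Bool.false_ne_true ht
    · rw [hE] at h4a h4b
      have ht : cR (1 + right) = true := by
        simp [hcR, Nat.add_comm 1 right, h4b]
        omega
      rw [hRf] at ht; exact Bool.false_ne_true ht
  rw [pvWhile_eq_map grid n m i j M hok hfail (n + 2) 0 (by omega) (by omega)]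
  have h0 : pvCells i j 0 = PySem.Set.ofList [((i : Int), (j : Int))] := rfl
  have hgrow := pvGrow_eq_map i j M 0
  simp only [Nat.zero_add] at hgrow
  rw [h0] at hgrow
  rw [show M + 1 - 0 = M + 1 from rfl, List.range'_succ, List.map_cons, h0, ← hgrow]

theorem get_pluses_eq (grid : List String) : get_pluses grid = get_pluses_alt grid := by
  unfold get_pluses get_pluses_alt
  apply PySem.List.foldl_congr_mem
  intro acc i hi
  have hin : i < grid.length := List.mem_range.mp hi
  apply PySem.List.foldl_congr_mem
  intro acc' j hj
  have hjm : j < (grid.headD "").toList.length := List.mem_range.mp hj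
  by_cases hG : pvGet grid i j = 'G'
  · simp only [hG, ne_eq, not_true_eq_false, if_false]
    rw [perCenter grid _ _ i j hin hjm hG]
  · simp [hG]

-- ===== VERDICT (by name: the statement is the Claim_ definition above) =====
theorem get_pluses_spec : Claim_equal_get_pluses := by
  intro grid _ _
  unfold Spec_get_pluses
  exact get_pluses_eq grid
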